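-- pv_equiv track=rewrite | github.com/miliar/Code_Jam_Webscraper | solutions_python/Problem_200/1500.py | fail_tidy_start
-- ===== SOURCE A (Python) =====
-- def fail_tidy_start(digits):
--     assert digits is not None
--
--     low = digits[0]
--     for i, d in enumerate(digits[1:], start=1):
--         if d < low:
--             return i
--         low = max(low, d)
--
--     return None
-- ===== SOURCE B (Python) =====
-- def fail_tidy_start(digits):
--     assert digits is not None
--
--     last = digits[0]
--     prefix = [last]
--     for d in digits[1:]:
--         last = max(last, d)
--         prefix.append(last)
--
--     for i, (d, p) in enumerate(zip(digits[1:], prefix), start=1):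
--         if d < p:
--             return i
--     return None
-- ===== Notes on version B (the rewrite author's own statement) =====
-- stated objective: alternative
-- what changed: Replaces A's fused running-max-and-compare single loop with two separate passes: first build the prefix-maximum table, then scan digits against the shifted table for the first drop.
import Mathlib
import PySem

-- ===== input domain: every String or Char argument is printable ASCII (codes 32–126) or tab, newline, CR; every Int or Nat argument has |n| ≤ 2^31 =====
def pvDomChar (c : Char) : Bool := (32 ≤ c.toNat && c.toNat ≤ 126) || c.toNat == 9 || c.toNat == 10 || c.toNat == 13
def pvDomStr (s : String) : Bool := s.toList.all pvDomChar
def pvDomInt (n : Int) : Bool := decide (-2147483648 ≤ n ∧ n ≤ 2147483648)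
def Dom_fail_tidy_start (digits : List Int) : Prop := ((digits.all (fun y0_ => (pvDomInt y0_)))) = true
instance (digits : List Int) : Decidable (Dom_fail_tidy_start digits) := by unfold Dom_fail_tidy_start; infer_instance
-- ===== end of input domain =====

-- B replaces A's fused running-max-and-compare loop with two passes: build the
-- prefix-maximum table, then scan for the first drop (objective: alternative decomposition).

-- ===== PORT A =====
-- A's for-loop: low is the running max, i the 1-based index into digits[1:].
def pvALoop (low : Int) (i : Int) : List Int → Option Int
  | [] => none
  | d :: rest => if d < low then some i else pvALoop (max low d) (i + 1) rest

def fail_tidy_start (digits : List Int) : Option Int :=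
  match digits with
  | [] => none   -- digits[0] raises IndexError in Python; excluded by Pre_
  | d0 :: rest => pvALoop d0 1 rest

-- ===== PORT B =====
-- first pass of Source B: prefix.append(max(last, d)) for each d (returns the appended tail).
def pvBuildPrefix (last : Int) : List Int → List Int
  | [] => []
  | d :: rest => (max last d) :: pvBuildPrefix (max last d) rest

-- second pass of Source B: enumerate(zip(digits[1:], prefix), start=1).
def pvBScan (i : Int) : List Int → List Int → Option Int
  | d :: ds, p :: ps => if d < p then some i else pvBScan (i + 1) ds ps
  | _, _ => none

def fail_tidy_start_alt (digits : List Int) : Option Int :=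
  match digits with
  | [] => none   -- digits[0] raises IndexError in Python; excluded by Pre_
  | d0 :: rest => pvBScan 1 rest (d0 :: pvBuildPrefix d0 rest)

-- ===== PRECONDITION & SPEC =====
-- A evaluates digits[0], which raises IndexError on the empty list; hence digits ≠ [].
def Pre_fail_tidy_start (digits : List Int) : Prop := digits ≠ []
instance (digits : List Int) : Decidable (Pre_fail_tidy_start digits) := by unfold Pre_fail_tidy_start; infer_instance
def pvWitness_fail_tidy_start : List Int := [3, 1, 4]

def Spec_fail_tidy_start (digits : List Int) (out : Option Int) : Prop := out = fail_tidy_start_alt digits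
instance (digits : List Int) (out : Option Int) : Decidable (Spec_fail_tidy_start digits out) := by unfold Spec_fail_tidy_start; infer_instance

-- ===== CLAIM (what is proved, stated in full; the proofs are below) =====
def Claim_equal_fail_tidy_start : Prop := ∀ (digits : List Int), Dom_fail_tidy_start digits → Pre_fail_tidy_start digits → Spec_fail_tidy_start digits (fail_tidy_start digits)

-- ===== LEMMAS AND PROOFS =====
theorem pvALoop_eq_bScan (rest : List Int) : ∀ (low i : Int),
    pvALoop low i rest = pvBScan i rest (low :: pvBuildPrefix low rest) := by
  induction rest with
  | nil => intro low i; rfl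
  | cons d r ih =>
      intro low i
      simp only [pvALoop, pvBuildPrefix, pvBScan]
      by_cases h : d < low
      · simp [h]
      · simp [h, ih]

-- ===== VERDICT (by name: the statement is the Claim_ definition above) =====
theorem fail_tidy_start_spec : Claim_equal_fail_tidy_start := by
  intro digits _ hpre
  unfold Spec_fail_tidy_start fail_tidy_start fail_tidy_start_alt
  match digits with
  | [] => exact absurd rfl hpre
  | d0 :: rest => exact pvALoop_eq_bScan rest d0 1
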